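-- pv_equiv track=rewrite | github.com/marco-city-flow/dev-city-flow | tools/generator/assign_engine.py | group_intersections_by_length
-- ===== SOURCE A (Python) =====
-- import heapq
--
-- def group_intersections_by_length(intersections, n):
--     lists = [[] for _ in range(n)]
--     number_list = list(intersections)
--     totals = [(0, i) for i in range(n)]
--     heapq.heapify(totals)
--     for _ in range(len(intersections)):
--         total, index = heapq.heappop(totals)
--         lists[index].append(intersections[_])
--         heapq.heappush(
--             totals, (total + intersections[_]['distanceToMidpoints'], index))
--         number_list[_] = index
--     return number_list, lists
-- ===== SOURCE B (Python) =====
-- def group_intersections_by_length(intersections, n):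
--     totals = [0] * n
--     lists = [[] for _ in range(n)]
--     number_list = []
--     for inter in intersections:
--         index = 0
--         for i in range(1, n):
--             if totals[i] < totals[index]:
--                 index = i
--         lists[index].append(inter)
--         totals[index] += inter['distanceToMidpoints']
--         number_list.append(index)
--     return number_list, lists
-- ===== Notes on version B (the rewrite author's own statement) =====
-- stated objective: simpler
-- what changed: Replaces the heapq priority queue of (running total, bin index) pairs with a plain list of n running totals and a first-minimum linear scan per item (ties to the smallest index, matching the heap's lexicographic order), appending indices instead of overwriting a copied list.
import Mathlib
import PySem

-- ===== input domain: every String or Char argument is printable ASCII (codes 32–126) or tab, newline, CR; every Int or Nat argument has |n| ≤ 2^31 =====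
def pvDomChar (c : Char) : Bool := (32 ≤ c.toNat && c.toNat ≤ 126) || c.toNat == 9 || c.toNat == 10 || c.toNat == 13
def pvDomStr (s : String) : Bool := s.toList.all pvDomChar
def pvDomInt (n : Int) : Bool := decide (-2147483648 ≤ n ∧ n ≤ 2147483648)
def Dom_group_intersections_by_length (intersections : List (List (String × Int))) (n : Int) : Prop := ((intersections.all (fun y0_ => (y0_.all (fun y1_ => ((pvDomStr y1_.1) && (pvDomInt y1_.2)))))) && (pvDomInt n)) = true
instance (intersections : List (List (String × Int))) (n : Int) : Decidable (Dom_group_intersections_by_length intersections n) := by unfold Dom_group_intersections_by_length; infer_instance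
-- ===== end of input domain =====

-- B replaces the heap of (total, index) pairs by a plain totals list with a first-minimum scan
-- (objective: simpler).  Equivalence is about the RETURN value; A mutates no argument.

-- ===== PORT A =====
-- Python tuple comparison (total, index) is lexicographic.
def pvMinStep (a b : Int × Int) : Int × Int :=
  if b.1 < a.1 ∨ (b.1 = a.1 ∧ b.2 < a.2) then b else a

-- heapq.heappop: here the heap always holds ONE entry per bin index, so its elements are
-- pairwise distinct and heappop returns exactly the unique lexicographic minimum; the heap's
-- internal array layout is unobservable, so the library calls are ported as min-extraction
-- (exact for heapq on these inputs).  [] branch is unreachable under Pre_ (Python: IndexError).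
def pvHeapPop (l : List (Int × Int)) : (Int × Int) × List (Int × Int) :=
  match l with
  | [] => ((0, 0), [])
  | h :: t =>
    let m := t.foldl pvMinStep h
    (m, (h :: t).erase m)

-- one iteration of A's "for _ in range(len(intersections))" loop; state = (totals, lists, number_list's
-- written prefix: the initial copy of `intersections` is fully overwritten, so only the indices remain)
def pvStepA (st : List (Int × Int) × List (List (List (String × Int))) × List Int)
    (item : List (String × Int)) :
    List (Int × Int) × List (List (List (String × Int))) × List Int :=
  let totals := st.1
  let lists := st.2.1
  let nums := st.2.2
  let p := pvHeapPop totals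
  let total := p.1.1
  let index := p.1.2
  let lists' := lists.set index.toNat (lists.getD index.toNat [] ++ [item])
  let d := ((PySem.Dict.ofList item).get? "distanceToMidpoints").getD 0   -- KeyError excluded by Pre_
  (p.2 ++ [(total + d, index)], lists', nums ++ [index])

def group_intersections_by_length (intersections : List (List (String × Int))) (n : Int) :
    List Int × (List (List (List (String × Int)))) :=
  let lists0 : List (List (List (String × Int))) := (PySem.List.pyRange 0 n 1).map (fun _ => [])
  let totals0 : List (Int × Int) := (PySem.List.pyRange 0 n 1).map (fun i => ((0 : Int), i))
  let fin := intersections.foldl pvStepA (totals0, lists0, [])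
  (fin.2.2, fin.2.1)

-- ===== PORT B =====
-- index = 0; for i in range(1, n): if totals[i] < totals[index]: index = i
def pvArgmin (totals : List Int) (n : Int) : Int :=
  (PySem.List.pyRange 1 n 1).foldl
    (fun index i =>
      if PySem.List.pyGetD totals i 0 < PySem.List.pyGetD totals index 0 then i else index) 0

def pvStepB (n : Int) (st : List Int × List (List (List (String × Int))) × List Int)
    (item : List (String × Int)) :
    List Int × List (List (List (String × Int))) × List Int :=
  let totals := st.1
  let lists := st.2.1
  let nums := st.2.2
  let index := pvArgmin totals n
  let lists' := lists.set index.toNat (lists.getD index.toNat [] ++ [item])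
  let d := ((PySem.Dict.ofList item).get? "distanceToMidpoints").getD 0   -- KeyError excluded by Pre_
  let totals' := totals.set index.toNat (PySem.List.pyGetD totals index 0 + d)
  (totals', lists', nums ++ [index])

def group_intersections_by_length_alt (intersections : List (List (String × Int))) (n : Int) :
    List Int × (List (List (List (String × Int)))) :=
  let totals0 : List Int := List.replicate n.toNat 0
  let lists0 : List (List (List (String × Int))) := (PySem.List.pyRange 0 n 1).map (fun _ => [])
  let fin := intersections.foldl (pvStepB n) (totals0, lists0, [])
  (fin.2.2, fin.2.1)

-- ===== PRECONDITION & SPEC =====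
-- Pre_ excludes exactly the inputs where the Pythons raise: a nonempty intersections list with
-- n < 1 (A: IndexError popping an empty heap; B: IndexError indexing totals/lists), and any
-- intersection dict lacking the key 'distanceToMidpoints' (KeyError in both).
def Pre_group_intersections_by_length (intersections : List (List (String × Int))) (n : Int) : Prop :=
  (intersections = [] ∨ 1 ≤ n) ∧
    ∀ item ∈ intersections, ((PySem.Dict.ofList item).get? "distanceToMidpoints").isSome = true
instance (intersections : List (List (String × Int))) (n : Int) : Decidable (Pre_group_intersections_by_length intersections n) := by unfold Pre_group_intersections_by_length; infer_instance

def pvWitness_group_intersections_by_length : (List (List (String × Int))) × Int :=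
  ([[("distanceToMidpoints", 2)], [("distanceToMidpoints", 1)], [("distanceToMidpoints", 3)]], 2)

def Spec_group_intersections_by_length (intersections : List (List (String × Int))) (n : Int) (out : List Int × (List (List (List (String × Int))))) : Prop := out = group_intersections_by_length_alt intersections n
instance (intersections : List (List (String × Int))) (n : Int) (out : List Int × (List (List (List (String × Int))))) : Decidable (Spec_group_intersections_by_length intersections n out) := by unfold Spec_group_intersections_by_length; infer_instance

-- ===== CLAIM (what is proved, stated in full; the proofs are below) =====
def Claim_equal_group_intersections_by_length : Prop := ∀ (intersections : List (List (String × Int))) (n : Int), Dom_group_intersections_by_length intersections n → Pre_group_intersections_by_length intersections n → Spec_group_intersections_by_length intersections n (group_intersections_by_length intersections n)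

-- ===== LEMMAS AND PROOFS =====

-- lexicographic ≤ on (total, index) pairs, Python's tuple order
def pvLexLe (a b : Int × Int) : Prop := a.1 < b.1 ∨ (a.1 = b.1 ∧ a.2 ≤ b.2)

lemma pvLexLe_trans {a b c : Int × Int} (h1 : pvLexLe a b) (h2 : pvLexLe b c) : pvLexLe a c := by
  unfold pvLexLe at *; omega

lemma pvLexLe_antisymm {a b : Int × Int} (h1 : pvLexLe a b) (h2 : pvLexLe b a) : a = b := by
  unfold pvLexLe at *
  have : a.1 = b.1 ∧ a.2 = b.2 := by omega
  exact Prod.ext this.1 this.2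

lemma pvMinStep_cases (a b : Int × Int) :
    (pvMinStep a b = a ∨ pvMinStep a b = b) ∧ pvLexLe (pvMinStep a b) a ∧ pvLexLe (pvMinStep a b) b := by
  unfold pvMinStep pvLexLe
  split_ifs with h
  · exact ⟨Or.inr rfl, by omega, by omega⟩
  · exact ⟨Or.inl rfl, by omega, by omega⟩

-- the fold computes an element of h::t that is lexLe everything in h::t
lemma foldl_min_spec (t : List (Int × Int)) (h : Int × Int) :
    (t.foldl pvMinStep h ∈ h :: t) ∧ ∀ x ∈ h :: t, pvLexLe (t.foldl pvMinStep h) x := by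
  induction t generalizing h with
  | nil =>
    refine ⟨by simp, ?_⟩
    intro x hx
    simp only [List.foldl_nil] at *
    simp only [List.mem_singleton] at hx
    subst hx
    unfold pvLexLe
    omega
  | cons y t ih =>
    have hc := pvMinStep_cases h y
    obtain ⟨hmem, hall⟩ := ih (pvMinStep h y)
    rw [List.foldl_cons]
    constructor
    · rcases List.mem_cons.mp hmem with he | ht
      · rw [he]
        rcases hc.1 with h1 | h1 <;> rw [h1] <;> simp
      · simp [ht]
    · intro x hx
      rcases List.mem_cons.mp hx with rfl | hx'
      · exact pvLexLe_trans (hall _ List.mem_cons_self) hc.2.1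
      · rcases List.mem_cons.mp hx' with rfl | hx''
        · exact pvLexLe_trans (hall _ List.mem_cons_self) hc.2.2
        · exact hall _ (List.mem_cons_of_mem _ hx'')

-- uniqueness: any member that is lexLe everything equals the fold's minimum
lemma foldl_min_unique (t : List (Int × Int)) (h : Int × Int) (m : Int × Int)
    (hm : m ∈ h :: t) (hle : ∀ x ∈ h :: t, pvLexLe m x) :
    t.foldl pvMinStep h = m := by
  obtain ⟨hmem, hall⟩ := foldl_min_spec t h
  exact pvLexLe_antisymm (hall m hm) (hle _ hmem)

-- ===== B's argmin characterisation =====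
-- the enum list A's heap is a permutation of
def pvEnum (tB : List Int) : List (Int × Int) :=
  (List.range tB.length).map (fun i => (tB.getD i 0, (i : Int)))

lemma pvArgmin_aux (tB : List Int) (N : Nat) (hN : N < tB.length) :
    ∃ j : Nat, ((List.range N).foldl
        (fun (idx : Int) (k : Nat) => if PySem.List.pyGetD tB (1 + (k : Int)) 0 < PySem.List.pyGetD tB idx 0
          then 1 + (k : Int) else idx) 0) = (j : Int)
      ∧ j ≤ N ∧ ∀ i ≤ N, pvLexLe (tB.getD j 0, (j : Int)) (tB.getD i 0, (i : Int)) := by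
  induction N with
  | zero =>
    refine ⟨0, by simp, le_refl 0, ?_⟩
    intro i hi
    have : i = 0 := Nat.le_zero.mp hi
    subst this
    unfold pvLexLe
    omega
  | succ N ih =>
    obtain ⟨j, hfold, hjle, hmin⟩ := ih (by omega)
    rw [List.range_succ, List.foldl_append, hfold]
    simp only [List.foldl_cons, List.foldl_nil]
    have hcast : (1 + (N : Int)) = (((N + 1 : Nat)) : Int) := by push_cast; ring
    rw [hcast, PySem.List.pyGetD_natCast, PySem.List.pyGetD_natCast]
    by_cases hlt : tB.getD (N + 1) 0 < tB.getD j 0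
    · refine ⟨N + 1, by rw [if_pos hlt], le_refl _, ?_⟩
      intro i hi
      rcases Nat.lt_or_ge i (N + 1) with hiN | hiN
      · have h2 := hmin i (by omega)
        unfold pvLexLe at *
        omega
      · have : i = N + 1 := by omega
        subst this
        unfold pvLexLe
        omega
    · refine ⟨j, by rw [if_neg hlt], by omega, ?_⟩
      intro i hi
      rcases Nat.lt_or_ge i (N + 1) with hiN | hiN
      · exact hmin i (by omega)
      · have : i = N + 1 := by omega
        subst this
        unfold pvLexLe
        omega

lemma pvArgmin_spec (tB : List Int) (n : Int) (hn : 1 ≤ n) (hlen : tB.length = n.toNat) :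
    ∃ j : Nat, pvArgmin tB n = (j : Int) ∧ j < tB.length ∧
      ∀ i < tB.length, pvLexLe (tB.getD j 0, (j : Int)) (tB.getD i 0, (i : Int)) := by
  unfold pvArgmin
  rw [PySem.List.pyRange_one, List.foldl_map]
  have hN : (n - 1).toNat = tB.length - 1 := by omega
  rw [hN]
  obtain ⟨j, hfold, hjle, hmin⟩ := pvArgmin_aux tB (tB.length - 1) (by omega)
  exact ⟨j, hfold, by omega, fun i hi => hmin i (by omega)⟩

-- min of pvEnum is (tB[j], j) for B's argmin j
lemma heap_min_eq (tA : List (Int × Int)) (tB : List Int) (n : Int) (hn : 1 ≤ n)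
    (hlen : tB.length = n.toNat) (hperm : tA.Perm (pvEnum tB))
    (h : Int × Int) (t : List (Int × Int)) (htA : tA = h :: t) :
    ∃ j : Nat, pvArgmin tB n = (j : Int) ∧ j < tB.length ∧
      t.foldl pvMinStep h = (tB.getD j 0, (j : Int)) := by
  obtain ⟨j, hj, hjlt, hmin⟩ := pvArgmin_spec tB n hn hlen
  refine ⟨j, hj, hjlt, ?_⟩
  subst htA
  apply foldl_min_unique
  · exact hperm.symm.mem_iff.mp
      (List.mem_map.mpr ⟨j, List.mem_range.mpr hjlt, rfl⟩)
  · intro x hx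
    obtain ⟨i, hi, rfl⟩ := List.mem_map.mp (hperm.mem_iff.mp hx)
    exact hmin i (List.mem_range.mp hi)

-- the enum function, so rewriting can talk about it by name
def pvG (tB : List Int) : Nat → Int × Int := fun i => (tB.getD i 0, (i : Int))

-- erase-then-append is a permutation of the enum of the updated list
lemma enum_update_perm (tB : List Int) (j : Nat) (hj : j < tB.length) (d : Int) :
    ((pvEnum tB).erase (tB.getD j 0, (j : Int)) ++ [(tB.getD j 0 + d, (j : Int))]).Perm
      (pvEnum (tB.set j (tB.getD j 0 + d))) := by
  set v := tB.getD j 0 + d with hv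
  have hgg' : ∀ i, i ≠ j → pvG (tB.set j v) i = pvG tB i := by
    intro i hij
    unfold pvG
    congr 1
    simp only [List.getD_eq_getElem?_getD]
    rw [List.getElem?_set_ne (by omega)]
  have hg'j : pvG (tB.set j v) j = (v, (j : Int)) := by
    unfold pvG
    congr 1
    simp only [List.getD_eq_getElem?_getD]
    rw [List.getElem?_set_self (by omega)]
    rfl
  set r1 := (List.range tB.length).take j with hr1
  set r2 := (List.range tB.length).drop (j + 1) with hr2
  have hr : List.range tB.length = r1 ++ j :: r2 := by
    rw [hr1, hr2]
    have hjr : j < (List.range tB.length).length := by simpa using hj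
    conv_lhs => rw [← List.take_append_drop j (List.range tB.length)]
    rw [List.drop_eq_getElem_cons hjr]
    simp
  have hnd : (r1 ++ j :: r2).Nodup := by rw [← hr]; exact List.nodup_range
  have hjr1 : j ∉ r1 := by
    intro hmem
    exact (List.disjoint_of_nodup_append hnd) hmem (by simp)
  have hjr2 : j ∉ r2 := by
    rcases List.nodup_append.mp hnd with ⟨_, hnd2, _⟩
    exact (List.nodup_cons.mp hnd2).1
  have henum : pvEnum tB = r1.map (pvG tB) ++ pvG tB j :: r2.map (pvG tB) := by
    show (List.range tB.length).map (pvG tB) = _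
    rw [hr, List.map_append, List.map_cons]
  have henum' : pvEnum (tB.set j v)
      = r1.map (pvG (tB.set j v)) ++ pvG (tB.set j v) j :: r2.map (pvG (tB.set j v)) := by
    show (List.range (tB.set j v).length).map (pvG (tB.set j v)) = _
    rw [List.length_set, hr, List.map_append, List.map_cons]
  have hgja : pvG tB j ∉ r1.map (pvG tB) := by
    intro hmem
    obtain ⟨i, hi, heq⟩ := List.mem_map.mp hmem
    have h2 : (i : Int) = (j : Int) := congrArg Prod.snd heq
    have h3 : i = j := by exact_mod_cast h2
    exact hjr1 (h3 ▸ hi)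
  have herase : (pvEnum tB).erase (pvG tB j) = r1.map (pvG tB) ++ r2.map (pvG tB) := by
    rw [henum, List.erase_append_right _ hgja, List.erase_cons_head]
  have hmapr1 : r1.map (pvG (tB.set j v)) = r1.map (pvG tB) :=
    List.map_congr_left (fun i hi => hgg' i (fun he => hjr1 (he ▸ hi)))
  have hmapr2 : r2.map (pvG (tB.set j v)) = r2.map (pvG tB) :=
    List.map_congr_left (fun i hi => hgg' i (fun he => hjr2 (he ▸ hi)))
  have hgje : pvG tB j = (tB.getD j 0, (j : Int)) := rfl
  have h1 : (pvEnum tB).erase (tB.getD j 0, (j : Int)) ++ [(v, (j : Int))]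
      = r1.map (pvG tB) ++ (r2.map (pvG tB) ++ [pvG (tB.set j v) j]) := by
    rw [← hgje, herase, List.append_assoc, hg'j]
  have h2 : pvEnum (tB.set j v)
      = r1.map (pvG tB) ++ (pvG (tB.set j v) j :: r2.map (pvG tB)) := by
    rw [henum', hmapr1, hmapr2]
  rw [h1, h2]
  exact List.Perm.append_left _ (List.perm_append_singleton _ _)

-- main loop invariant
lemma loop_eq (items : List (List (String × Int))) (n : Int) (hn : 1 ≤ n)
    (tA : List (Int × Int)) (tB : List Int)
    (l : List (List (List (String × Int)))) (m : List Int)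
    (hlen : tB.length = n.toNat) (hperm : tA.Perm (pvEnum tB)) :
    (items.foldl pvStepA (tA, l, m)).2 = (items.foldl (pvStepB n) (tB, l, m)).2 := by
  induction items generalizing tA tB l m with
  | nil => rfl
  | cons item rest ih =>
    have hne : tA ≠ [] := by
      intro he
      have hlenA : tA.length = (pvEnum tB).length := hperm.length_eq
      unfold pvEnum at hlenA
      rw [he] at hlenA
      simp at hlenA
      omega
    obtain ⟨h, t, rfl⟩ := List.exists_cons_of_ne_nil hne
    obtain ⟨j, hj, hjlt, hmin⟩ := heap_min_eq (h :: t) tB n hn hlen hperm h t rfl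
    simp only [List.foldl_cons]
    have hA : pvStepA (h :: t, l, m) item =
        ((h :: t).erase (tB.getD j 0, (j : Int)) ++ [(tB.getD j 0 + ((PySem.Dict.ofList item).get? "distanceToMidpoints").getD 0, (j : Int))],
         l.set j (l.getD j [] ++ [item]), m ++ [(j : Int)]) := by
      unfold pvStepA pvHeapPop
      simp only [hmin]
      simp
    have hB : pvStepB n (tB, l, m) item =
        (tB.set j (tB.getD j 0 + ((PySem.Dict.ofList item).get? "distanceToMidpoints").getD 0),
         l.set j (l.getD j [] ++ [item]), m ++ [(j : Int)]) := by
      unfold pvStepB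
      simp only [hj]
      simp
    rw [hA, hB]
    apply ih
    · simp [hlen]
    · refine List.Perm.trans (List.Perm.append_right _ (hperm.erase _)) ?_
      exact enum_update_perm tB j hjlt _

-- ===== VERDICT (by name: the statement is the Claim_ definition above) =====
theorem group_intersections_by_length_spec : Claim_equal_group_intersections_by_length := by
  intro intersections n _ hpre
  unfold Spec_group_intersections_by_length
  rcases hpre.1 with rfl | hn
  · rfl
  · have hinit : (PySem.List.pyRange 0 n 1).map (fun i => ((0 : Int), i))
        = pvEnum (List.replicate n.toNat 0) := by
      rw [PySem.List.pyRange_one]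
      unfold pvEnum
      rw [List.length_replicate]
      have h0 : (n - 0).toNat = n.toNat := by omega
      rw [h0, List.map_map]
      apply List.map_congr_left
      intro k hk
      have hk' : k < n.toNat := List.mem_range.mp hk
      simp [List.getD_eq_getElem?_getD, hk']
    have hmain := loop_eq intersections n hn
      ((PySem.List.pyRange 0 n 1).map (fun i => ((0 : Int), i)))
      (List.replicate n.toNat 0)
      ((PySem.List.pyRange 0 n 1).map (fun _ => [])) []
      (by simp)
      (by rw [hinit])
    simp only [group_intersections_by_length, group_intersections_by_length_alt]
    rw [hmain]
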